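-- pv_equiv track=rewrite | github.com/ludovicfmp-bit/capacity | app_mv_analysis.py | score_option_b
-- ===== SOURCE A (Python) =====
-- def score_option_b(occ_minutes, sustain, tolerance, peak):
--     """Option B : Trois zones"""
--     score = 0
--     for occ in occ_minutes:
--         if occ <= sustain + tolerance:
--             score += 1
--         elif occ <= peak:
--             score += 0
--         else:
--             score -= (occ - peak) * 2
--     return score
-- ===== SOURCE B (Python) =====
-- def _bisect_right(xs, v):
--     """Rightmost insertion point of v in sorted xs (hand-written binary search)."""
--     lo, hi = 0, len(xs)
--     while lo < hi:
--         mid = (lo + hi) // 2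
--         if xs[mid] <= v:
--             lo = mid + 1
--         else:
--             hi = mid
--     return lo
--
--
-- def score_option_b(occ_minutes, sustain, tolerance, peak):
--     """Option B : Trois zones — sort once, then locate the zone boundaries by
--     binary search: the +1 zone is a prefix, the penalty zone a suffix, and the
--     penalty sum collapses to sum(tail) - len(tail)*peak."""
--     xs = sorted(occ_minutes)
--     ones = _bisect_right(xs, sustain + tolerance)
--     i = _bisect_right(xs, max(sustain + tolerance, peak))
--     tail = xs[i:]
--     return ones - 2 * (sum(tail) - len(tail) * peak)
-- ===== Notes on version B (the rewrite author's own statement) =====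
-- stated objective: alternative
-- what changed: B sorts the list once, finds the two zone boundaries by hand-written binary search (the +1 zone becomes a prefix, the penalty zone a suffix), and computes the penalty from the suffix sum as sum(tail) - len(tail)*peak, instead of A's single per-element branching loop.
import Mathlib
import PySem

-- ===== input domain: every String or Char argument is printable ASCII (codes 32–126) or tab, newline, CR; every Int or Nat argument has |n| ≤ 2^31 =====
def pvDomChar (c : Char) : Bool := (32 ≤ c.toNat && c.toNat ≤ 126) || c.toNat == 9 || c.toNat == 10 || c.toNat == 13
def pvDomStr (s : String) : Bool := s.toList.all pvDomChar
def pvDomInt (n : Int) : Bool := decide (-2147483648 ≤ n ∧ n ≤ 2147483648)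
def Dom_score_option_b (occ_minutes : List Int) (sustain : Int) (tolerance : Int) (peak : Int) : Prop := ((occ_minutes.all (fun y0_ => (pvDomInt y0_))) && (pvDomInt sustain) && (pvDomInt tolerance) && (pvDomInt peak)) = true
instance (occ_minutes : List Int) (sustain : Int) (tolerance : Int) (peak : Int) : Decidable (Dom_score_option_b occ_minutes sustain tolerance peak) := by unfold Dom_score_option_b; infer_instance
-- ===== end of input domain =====

-- B sorts once and locates the zone boundaries by binary search (the +1 zone becomes a
-- prefix, the penalty zone a suffix whose penalty is sum(tail) - len(tail)*peak) instead
-- of A's per-element branching loop: a genuinely different (sort + bisect) algorithm.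

-- ===== PORT A =====
def score_option_b (occ_minutes : List Int) (sustain : Int) (tolerance : Int) (peak : Int) : Int :=
  occ_minutes.foldl
    (fun score occ =>
      if occ ≤ sustain + tolerance then score + 1
      else if occ ≤ peak then score + 0
      else score - (occ - peak) * 2)
    0

-- ===== PORT B =====
-- hand-written binary search loop of Source B (_bisect_right); xs[mid] is ported as getD mid 0,
-- exact here since 0 ≤ mid < len(xs) whenever the loop body runs (lo < hi ≤ len xs);
-- Python's mid = (lo+hi)//2 on nonnegative ints is Nat division (lo + hi) / 2.
def pvBisectRight (xs : List Int) (v : Int) (lo hi : Nat) : Nat :=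
  if lo < hi then
    if xs.getD ((lo + hi) / 2) 0 ≤ v then pvBisectRight xs v ((lo + hi) / 2 + 1) hi
    else pvBisectRight xs v lo ((lo + hi) / 2)
  else lo
termination_by hi - lo
decreasing_by all_goals omega

def score_option_b_alt (occ_minutes : List Int) (sustain : Int) (tolerance : Int) (peak : Int) : Int :=
  let xs := PySem.List.sorted occ_minutes (fun x => x) false
  let ones := pvBisectRight xs (sustain + tolerance) 0 xs.length
  let i := pvBisectRight xs (max (sustain + tolerance) peak) 0 xs.length
  let tail := PySem.List.slice xs (some (i : Int)) none
  (ones : Int) - 2 * (tail.sum - (tail.length : Int) * peak)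

-- ===== PRECONDITION & SPEC =====
def Spec_score_option_b (occ_minutes : List Int) (sustain : Int) (tolerance : Int) (peak : Int) (out : Int) : Prop := out = score_option_b_alt occ_minutes sustain tolerance peak
instance (occ_minutes : List Int) (sustain : Int) (tolerance : Int) (peak : Int) (out : Int) : Decidable (Spec_score_option_b occ_minutes sustain tolerance peak out) := by unfold Spec_score_option_b; infer_instance

-- ===== CLAIM (what is proved, stated in full; the proofs are below) =====
def Claim_equal_score_option_b : Prop := ∀ (occ_minutes : List Int) (sustain : Int) (tolerance : Int) (peak : Int), Dom_score_option_b occ_minutes sustain tolerance peak → Spec_score_option_b occ_minutes sustain tolerance peak (score_option_b occ_minutes sustain tolerance peak)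

-- ===== LEMMAS AND PROOFS =====

-- per-element score of A's loop
def pvTerm (s t p occ : Int) : Int :=
  if occ ≤ s + t then 1 else if occ ≤ p then 0 else -((occ - p) * 2)

theorem pv_foldl_shift (l : List Int) (s t p acc : Int) :
    l.foldl (fun score occ =>
      if occ ≤ s + t then score + 1
      else if occ ≤ p then score + 0
      else score - (occ - p) * 2) acc
    = acc + l.foldl (fun score occ =>
      if occ ≤ s + t then score + 1
      else if occ ≤ p then score + 0
      else score - (occ - p) * 2) 0 := by
  induction l generalizing acc with
  | nil => simp
  | cons x xs ih =>
    simp only [List.foldl_cons]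
    rw [ih (if x ≤ s + t then acc + 1 else if x ≤ p then acc + 0 else acc - (x - p) * 2),
        ih (if x ≤ s + t then (0:Int) + 1 else if x ≤ p then (0:Int) + 0 else (0:Int) - (x - p) * 2)]
    split_ifs <;> ring

theorem pv_A_eq_sum (l : List Int) (s t p : Int) :
    score_option_b l s t p = (l.map (pvTerm s t p)).sum := by
  induction l with
  | nil => simp [score_option_b]
  | cons x xs ih =>
    have : score_option_b (x :: xs) s t p
        = (if x ≤ s + t then (0:Int) + 1 else if x ≤ p then (0:Int) + 0 else (0:Int) - (x - p) * 2)
          + score_option_b xs s t p := by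
      simp only [score_option_b, List.foldl_cons]
      exact pv_foldl_shift xs s t p _
    rw [this, ih]
    simp only [List.map_cons, List.sum_cons, pvTerm]
    split_ifs <;> ring

-- the term sum splits into a count of the prefix zone and a penalty sum: no order needed
theorem pv_sum_split (l : List Int) (s t p : Int) :
    (l.map (pvTerm s t p)).sum
      = ((l.filter (fun x => decide (x ≤ s + t))).length : Int)
        - 2 * ((l.filter (fun x => decide (max (s + t) p < x))).map (fun x => x - p)).sum := by
  induction l with
  | nil => simp
  | cons x xs ih =>
    simp only [List.map_cons, List.sum_cons, List.filter_cons]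
    by_cases h1 : x ≤ s + t
    · have h2 : ¬ (max (s + t) p < x) := by omega
      simp [pvTerm, h1, h2, ih]
      ring
    · by_cases h2 : x ≤ p
      · have h3 : ¬ (max (s + t) p < x) := by omega
        simp [pvTerm, h1, h2, h3, ih]
      · have h3 : max (s + t) p < x := by omega
        simp [pvTerm, h1, h2, h3, ih]
        ring

-- a sorted list is its (≤ v)-filter followed by its (> v)-filter
theorem pv_sorted_split (xs : List Int) (h : xs.Pairwise (· ≤ ·)) (v : Int) :
    xs = xs.filter (fun x => decide (x ≤ v)) ++ xs.filter (fun x => decide (v < x)) := by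
  induction xs with
  | nil => simp
  | cons x xs ih =>
    rcases List.pairwise_cons.mp h with ⟨hx, hxs⟩
    simp only [List.filter_cons]
    by_cases hv : x ≤ v
    · simp only [hv, decide_true, not_lt.mpr hv, lt_iff_not_ge]
      simp [← ih hxs]
    · have hv' : v < x := lt_of_not_ge hv
      have h1 : xs.filter (fun x => decide (x ≤ v)) = [] := by
        rw [List.filter_eq_nil_iff]
        intro a ha
        simp only [decide_eq_true_eq]
        have := hx a ha
        omega
      have h2 : xs.filter (fun x => decide (v < x)) = xs := by
        rw [List.filter_eq_self]
        intro a ha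
        simp only [decide_eq_true_eq]
        have := hx a ha
        omega
      simp [hv, hv', h1, h2]

-- binary-search characterisation: on a (getD-)monotone list, every in-range index k is
-- below the returned insertion point iff its element is ≤ v
theorem pv_bisect_char (xs : List Int) (v : Int)
    (mono : ∀ i j, i ≤ j → j < xs.length → xs.getD i 0 ≤ xs.getD j 0) :
    ∀ n lo hi, hi - lo ≤ n → lo ≤ hi → hi ≤ xs.length →
      (∀ k, k < lo → xs.getD k 0 ≤ v) →
      (∀ k, hi ≤ k → k < xs.length → v < xs.getD k 0) →
      lo ≤ pvBisectRight xs v lo hi ∧ pvBisectRight xs v lo hi ≤ hi ∧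
        (∀ k, k < xs.length → (k < pvBisectRight xs v lo hi ↔ xs.getD k 0 ≤ v)) := by
  intro n
  induction n with
  | zero =>
    intro lo hi hn hlohi hhi hbelow habove
    have heq : lo = hi := by omega
    subst heq
    rw [pvBisectRight, if_neg (lt_irrefl lo)]
    refine ⟨le_refl _, le_refl _, ?_⟩
    intro k hk
    constructor
    · intro h; exact hbelow k h
    · intro h
      by_contra hc
      exact absurd h (not_le.mpr (habove k (by omega) hk))
  | succ n ih =>
    intro lo hi hn hlohi hhi hbelow habove
    by_cases hlt : lo < hi
    · rw [pvBisectRight, if_pos hlt]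
      by_cases hv : xs.getD ((lo + hi) / 2) 0 ≤ v
      · rw [if_pos hv]
        have hb : ∀ k, k < (lo + hi) / 2 + 1 → xs.getD k 0 ≤ v := by
          intro k hk
          exact le_trans (mono k ((lo + hi) / 2) (by omega) (by omega)) hv
        rcases ih ((lo + hi) / 2 + 1) hi (by omega) (by omega) hhi hb habove with ⟨h1, h2, h3⟩
        exact ⟨by omega, h2, h3⟩
      · rw [if_neg hv]
        have ha : ∀ k, (lo + hi) / 2 ≤ k → k < xs.length → v < xs.getD k 0 := by
          intro k hk hk'
          exact lt_of_lt_of_le (lt_of_not_ge hv) (mono ((lo + hi) / 2) k hk hk')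
        rcases ih lo ((lo + hi) / 2) (by omega) (by omega) (by omega) hbelow ha with ⟨h1, h2, h3⟩
        exact ⟨h1, by omega, h3⟩
    · rw [pvBisectRight, if_neg hlt]
      refine ⟨le_refl _, by omega, ?_⟩
      intro k hk
      constructor
      · intro h; exact hbelow k h
      · intro h
        by_contra hc
        exact absurd h (not_le.mpr (habove k (by omega) hk))

-- on a sorted list the insertion point is the length of the (≤ v)-filter
theorem pv_bisect_eq_filter_length (xs : List Int) (h : xs.Pairwise (· ≤ ·)) (v : Int) :
    pvBisectRight xs v 0 xs.length = (xs.filter (fun x => decide (x ≤ v))).length := by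
  have mono : ∀ i j, i ≤ j → j < xs.length → xs.getD i 0 ≤ xs.getD j 0 := by
    intro i j hij hj
    rw [List.getD_eq_getElem xs 0 (lt_of_le_of_lt hij hj), List.getD_eq_getElem xs 0 hj]
    rcases lt_or_eq_of_le hij with hlt | heq
    · exact List.pairwise_iff_getElem.mp h i j _ hj hlt
    · subst heq; exact le_refl _
  rcases pv_bisect_char xs v mono xs.length 0 xs.length (by omega) (Nat.zero_le _) (le_refl _)
    (by intro k hk; omega) (by intro k hk hk'; omega) with ⟨_, hle, hchar⟩
  set r := pvBisectRight xs v 0 xs.length with hr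
  set A := xs.filter (fun x => decide (x ≤ v)) with hA
  have hsplit := pv_sorted_split xs h v
  have hAlen : A.length ≤ xs.length := List.length_filter_le _ _
  have hmemA : ∀ k, (hk : k < A.length) → A[k] ≤ v := by
    intro k hk
    have : A[k] ∈ A := List.getElem_mem hk
    have := List.of_mem_filter this
    simpa using this
  by_contra hne
  rcases Nat.lt_or_ge r A.length with hlt | hge
  · -- index r is inside A, so xs.getD r 0 ≤ v, so r < r: contradiction
    have hrx : r < xs.length := lt_of_lt_of_le hlt hAlen
    have : xs.getD r 0 ≤ v := by
      conv_lhs => rw [hsplit]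
      rw [List.getD_append _ _ _ _ hlt, List.getD_eq_getElem A 0 hlt]
      exact hmemA r hlt
    have := (hchar r hrx).mpr this
    omega
  · have hgt : A.length < r := lt_of_le_of_ne hge (fun e => hne e.symm)
    have hrx : A.length < xs.length := lt_of_lt_of_le hgt hle
    have hAl : A.length = (xs.filter (fun x => decide (x ≤ v))).length := by rw [hA]
    have hBlen : 0 < (xs.filter (fun x => decide (v < x))).length := by
      have hlen := congrArg List.length hsplit
      rw [List.length_append] at hlen
      omega
    have : v < xs.getD A.length 0 := by
      conv_rhs => rw [hsplit]
      rw [hAl]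
      rw [List.getD_append_right _ _ _ _ (le_refl _), Nat.sub_self]
      rw [List.getD_eq_getElem _ 0 hBlen]
      have hmem : (xs.filter (fun x => decide (v < x)))[0] ∈
          xs.filter (fun x => decide (v < x)) := List.getElem_mem hBlen
      have := List.of_mem_filter hmem
      simpa using this
    have := (hchar A.length hrx).mp hgt
    omega

-- sum of (x - p) over a list
theorem pv_sum_map_sub (l : List Int) (p : Int) :
    (l.map (fun x => x - p)).sum = l.sum - (l.length : Int) * p := by
  induction l with
  | nil => simp
  | cons x xs ih => simp [ih]; ring

theorem pv_eq (l : List Int) (s t p : Int) :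
    score_option_b l s t p = score_option_b_alt l s t p := by
  set xs := PySem.List.sorted l (fun x => x) false with hxs
  have hperm : xs.Perm l := PySem.List.sorted_perm l (fun x => x) false
  have hpw : xs.Pairwise (· ≤ ·) := by
    have := PySem.List.sorted_pairwise l (fun x => x)
    simpa using this
  -- A's score, moved onto the sorted list and split into the two zones
  have hA : score_option_b l s t p
      = ((xs.filter (fun x => decide (x ≤ s + t))).length : Int)
        - 2 * ((xs.filter (fun x => decide (max (s + t) p < x))).map (fun x => x - p)).sum := by
    rw [pv_A_eq_sum, ← (hperm.map (pvTerm s t p)).sum_eq, pv_sum_split]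
  -- B's pieces
  have h1 : pvBisectRight xs (s + t) 0 xs.length
      = (xs.filter (fun x => decide (x ≤ s + t))).length :=
    pv_bisect_eq_filter_length xs hpw (s + t)
  have h2 : pvBisectRight xs (max (s + t) p) 0 xs.length
      = (xs.filter (fun x => decide (x ≤ max (s + t) p))).length :=
    pv_bisect_eq_filter_length xs hpw (max (s + t) p)
  have htail : PySem.List.slice xs (some ((pvBisectRight xs (max (s + t) p) 0 xs.length : Nat) : Int)) none
      = xs.filter (fun x => decide (max (s + t) p < x)) := by
    rw [PySem.List.slice_from_natCast, h2]
    nth_rewrite 2 [pv_sorted_split xs hpw (max (s + t) p)]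
    exact List.drop_left
  show score_option_b l s t p
      = (↑(pvBisectRight xs (s + t) 0 xs.length) : Int)
        - 2 * ((PySem.List.slice xs (some ((pvBisectRight xs (max (s + t) p) 0 xs.length : Nat) : Int)) none).sum
          - ((PySem.List.slice xs (some ((pvBisectRight xs (max (s + t) p) 0 xs.length : Nat) : Int)) none).length : Int) * p)
  rw [htail, h1, hA, ← pv_sum_map_sub]

-- ===== VERDICT (by name: the statement is the Claim_ definition above) =====
theorem score_option_b_spec : Claim_equal_score_option_b := by
  intro l s t p _
  exact pv_eq l s t p
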